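-- pv_equiv track=rewrite | github.com/nandamiftahul/pyiris | pyirisguiqt.170925.py | _pick_default_moment
-- ===== SOURCE A (Python) =====
-- def _pick_default_moment(fields):
-- 	# try nice priorities; fall back to the first field
-- 	prio = ["DBZ", "DBT", "REF", "VEL", "ZDR", "PHIDP", "KDP", "RHOHV", "SQI"]
-- 	upper = {f.upper(): f for f in fields}
-- 	for p in prio:
-- 		for uf, orig in upper.items():
-- 			if p in uf:
-- 				return orig
-- 	return fields[0]
-- ===== SOURCE B (Python) =====
-- def _pick_default_moment(fields):
--     # single pass: rank each dict item by first matching priority, keep the argmin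
--     prio = ["DBZ", "DBT", "REF", "VEL", "ZDR", "PHIDP", "KDP", "RHOHV", "SQI"]
--     upper = {f.upper(): f for f in fields}
--     best = None  # (rank, orig), first item with minimal rank
--     for uf, orig in upper.items():
--         r = next((i for i, p in enumerate(prio) if p in uf), len(prio))
--         if best is None or r < best[0]:
--             best = (r, orig)
--     if best is None or best[0] == len(prio):
--         return fields[0]
--     return best[1]
-- ===== Notes on version B (the rewrite author's own statement) =====
-- stated objective: alternative
-- what changed: Replaces the priority-outer repeated scan of the dict with a single pass over the dict items that computes each item's priority rank and keeps the stable argmin by (rank, position), falling back to fields[0] when no rank matched.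
import Mathlib
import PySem

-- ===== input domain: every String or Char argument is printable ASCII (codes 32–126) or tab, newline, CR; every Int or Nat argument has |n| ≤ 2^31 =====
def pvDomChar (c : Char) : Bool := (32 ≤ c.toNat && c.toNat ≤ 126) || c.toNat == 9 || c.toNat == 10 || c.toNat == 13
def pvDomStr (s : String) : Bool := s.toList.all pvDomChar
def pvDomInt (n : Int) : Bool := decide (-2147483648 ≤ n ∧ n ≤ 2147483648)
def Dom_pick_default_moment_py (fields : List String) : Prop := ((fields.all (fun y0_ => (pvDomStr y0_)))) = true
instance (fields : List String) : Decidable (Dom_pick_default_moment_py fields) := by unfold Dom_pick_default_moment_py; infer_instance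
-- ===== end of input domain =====

-- B replaces A's priority-outer repeated dict scan by a single pass over the dict
-- items that ranks each item by its first matching priority and keeps the stable
-- argmin by (rank, position); objective: alternative decomposition (same cost).

-- ===== PORT A =====

-- the shared priority list (plain data used by both Pythons)
def pvPrio : List String := ["DBZ", "DBT", "REF", "VEL", "ZDR", "PHIDP", "KDP", "RHOHV", "SQI"]

-- the shared dict comprehension {f.upper(): f for f in fields}
def pvUpper (fields : List String) : PySem.Dict String String :=
  fields.foldl (fun d f => d.insert (PySem.Str.upper f) f) PySem.Dict.empty

-- inner loop: for uf, orig in upper.items(): if p in uf: return orig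
def pickAInner (p : String) : List (String × String) → Option String
  | [] => none
  | (uf, orig) :: rest => if PySem.Str.isIn p uf then some orig else pickAInner p rest

-- outer loop: for p in prio: …
def pickALoop : List String → List (String × String) → Option String
  | [], _ => none
  | p :: ps, items =>
    match pickAInner p items with
    | some o => some o
    | none => pickALoop ps items

def pick_default_moment_py (fields : List String) : String :=
  match pickALoop pvPrio (pvUpper fields).items with
  | some o => o
  | none => (PySem.List.pyGet? fields 0).getD ""   -- fields[0]; IndexError (excluded by Pre_) ported as ""

-- ===== PORT B =====

-- r = next((i for i, p in enumerate(prio) if p in uf), len(prio))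
def pvRank (ps : List String) (uf : String) : Nat :=
  match ps with
  | [] => 0
  | p :: rest => if PySem.Str.isIn p uf then 0 else pvRank rest uf + 1

-- the single pass: best = None; for uf, orig in upper.items(): …
def pvBestFold (ps : List String) (items : List (String × String))
    (acc : Option (Nat × String)) : Option (Nat × String) :=
  items.foldl
    (fun best it =>
      let r := pvRank ps it.1
      match best with
      | none => some (r, it.2)
      | some (br, bo) => if r < br then some (r, it.2) else some (br, bo))
    acc

def pick_default_moment_py_alt (fields : List String) : String :=
  match pvBestFold pvPrio (pvUpper fields).items none with
  | none => (PySem.List.pyGet? fields 0).getD ""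
  | some (r, o) =>
    if r == pvPrio.length then (PySem.List.pyGet? fields 0).getD "" else o

-- ===== PRECONDITION & SPEC =====
-- Pre_ excludes the empty list, on which Python A raises IndexError at the fields[0] fallback.
def Pre_pick_default_moment_py (fields : List String) : Prop := fields ≠ []
instance (fields : List String) : Decidable (Pre_pick_default_moment_py fields) := by
  unfold Pre_pick_default_moment_py; infer_instance

def pvWitness_pick_default_moment_py : List String := ["dbzh", "vel"]

def Spec_pick_default_moment_py (fields : List String) (out : String) : Prop := out = pick_default_moment_py_alt fields
instance (fields : List String) (out : String) : Decidable (Spec_pick_default_moment_py fields out) := by unfold Spec_pick_default_moment_py; infer_instance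

-- ===== CLAIM (what is proved, stated in full; the proofs are below) =====
def Claim_equal_pick_default_moment_py : Prop := ∀ (fields : List String), Dom_pick_default_moment_py fields → Pre_pick_default_moment_py fields → Spec_pick_default_moment_py fields (pick_default_moment_py fields)

-- ===== LEMMAS AND PROOFS =====

-- the fold's step function, named for the proofs
def pvStep (ps : List String) (best : Option (Nat × String)) (it : String × String) :
    Option (Nat × String) :=
  let r := pvRank ps it.1
  match best with
  | none => some (r, it.2)
  | some (br, bo) => if r < br then some (r, it.2) else some (br, bo)

theorem pvBestFold_eq_foldl (ps : List String) (items : List (String × String))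
    (acc : Option (Nat × String)) :
    pvBestFold ps items acc = items.foldl (pvStep ps) acc := rfl

theorem pvRank_cons (p : String) (ps : List String) (uf : String) :
    pvRank (p :: ps) uf = if PySem.Str.isIn p uf then 0 else pvRank ps uf + 1 := rfl

-- once the accumulator holds rank 0 the fold never changes it
theorem pvBestFold_zero (ps : List String) (items : List (String × String)) (o : String) :
    pvBestFold ps items (some (0, o)) = some (0, o) := by
  induction items with
  | nil => rfl
  | cons it rest ih =>
    rw [pvBestFold_eq_foldl, List.foldl_cons]
    have hstep : pvStep ps (some (0, o)) it = some (0, o) := by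
      simp only [pvStep]
      rw [if_neg (Nat.not_lt_zero _)]
    rw [hstep, ← pvBestFold_eq_foldl, ih]

-- if no item contains p, folding with p :: ps is the ps fold with every rank shifted by one
theorem pvBestFold_shift (p : String) (ps : List String) (items : List (String × String))
    (h : ∀ it ∈ items, PySem.Str.isIn p it.1 = false) (acc : Option (Nat × String)) :
    pvBestFold (p :: ps) items (acc.map (fun x => (x.1 + 1, x.2))) =
      (pvBestFold ps items acc).map (fun x => (x.1 + 1, x.2)) := by
  induction items generalizing acc with
  | nil => rfl
  | cons it rest ih =>
    have hit := h it (by simp)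
    have hrest : ∀ it' ∈ rest, PySem.Str.isIn p it'.1 = false := fun it' h' => h it' (by simp [h'])
    rw [pvBestFold_eq_foldl, List.foldl_cons, pvBestFold_eq_foldl, List.foldl_cons]
    have hstep : pvStep (p :: ps) (acc.map (fun x => (x.1 + 1, x.2))) it =
        (pvStep ps acc it).map (fun x => (x.1 + 1, x.2)) := by
      cases acc with
      | none => simp only [pvStep, Option.map, pvRank_cons, hit, Bool.false_eq_true, if_false]
      | some x =>
        obtain ⟨br, bo⟩ := x
        simp only [pvStep, Option.map, pvRank_cons, hit, Bool.false_eq_true, if_false]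
        by_cases hlt : pvRank ps it.1 < br
        · have h2 : pvRank ps it.1 + 1 < br + 1 := by omega
          rw [if_pos hlt, if_pos h2]
        · have h2 : ¬ pvRank ps it.1 + 1 < br + 1 := by omega
          rw [if_neg hlt, if_neg h2]
    rw [hstep, ← pvBestFold_eq_foldl, ← pvBestFold_eq_foldl, ih hrest]

-- if the inner loop finds o first, the p :: ps fold yields rank 0 with that o
theorem pvBestFold_firstmatch (p : String) (ps : List String) (items : List (String × String))
    (o : String) (hfind : pickAInner p items = some o) (acc : Option (Nat × String))
    (hacc : ∀ br bo, acc = some (br, bo) → 1 ≤ br) :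
    pvBestFold (p :: ps) items acc = some (0, o) := by
  induction items generalizing acc with
  | nil => simp [pickAInner] at hfind
  | cons it rest ih =>
    obtain ⟨uf, orig⟩ := it
    rw [pvBestFold_eq_foldl, List.foldl_cons, ← pvBestFold_eq_foldl]
    by_cases hin : PySem.Str.isIn p uf
    · have hfo : o = orig := by
        simp only [pickAInner, hin, if_true, Option.some.injEq] at hfind
        exact hfind.symm
      subst hfo
      have hr0 : pvRank (p :: ps) uf = 0 := by rw [pvRank_cons, hin, if_pos rfl]
      have hstep : pvStep (p :: ps) acc (uf, o) = some (0, o) := by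
        cases acc with
        | none => simp only [pvStep, hr0]
        | some x =>
          obtain ⟨br, bo⟩ := x
          have hbr : 1 ≤ br := hacc br bo rfl
          simp only [pvStep, hr0]
          have : (0 : Nat) < br := by omega
          simp only [this, if_true]
      rw [hstep]
      exact pvBestFold_zero (p :: ps) rest o
    · have hin' : PySem.Str.isIn p uf = false := by simpa using hin
      have hfind' : pickAInner p rest = some o := by
        simp only [pickAInner, hin', Bool.false_eq_true, if_false] at hfind
        exact hfind
      have h1 : 1 ≤ pvRank (p :: ps) uf := by rw [pvRank_cons, hin', if_neg (by simp)]; omega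
      have hacc' : ∀ br bo, pvStep (p :: ps) acc (uf, orig) = some (br, bo) → 1 ≤ br := by
        cases acc with
        | none =>
          intro br bo hx
          simp only [pvStep] at hx
          injection hx with hx
          have : br = pvRank (p :: ps) uf := by
            have := congrArg Prod.fst hx; simpa using this.symm
          omega
        | some x =>
          obtain ⟨br0, bo0⟩ := x
          have hbr0 : 1 ≤ br0 := hacc br0 bo0 rfl
          intro br bo hx
          simp only [pvStep] at hx
          by_cases hlt : pvRank (p :: ps) uf < br0
          · rw [if_pos hlt] at hx
            injection hx with hx
            have : br = pvRank (p :: ps) uf := by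
              have := congrArg Prod.fst hx; simpa using this.symm
            omega
          · rw [if_neg hlt] at hx
            injection hx with hx
            have : br = br0 := by
              have := congrArg Prod.fst hx; simpa using this.symm
            omega
      exact ih hfind' _ hacc'

-- with the empty priority list every rank is 0
theorem pvBestFold_nil_rank (items : List (String × String)) (acc : Option (Nat × String))
    (hacc : ∀ br bo, acc = some (br, bo) → br = 0) :
    ∀ r o, pvBestFold [] items acc = some (r, o) → r = 0 := by
  induction items generalizing acc with
  | nil => intro r o h; exact hacc r o h
  | cons it rest ih =>
    intro r o h
    rw [pvBestFold_eq_foldl, List.foldl_cons, ← pvBestFold_eq_foldl] at h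
    refine ih _ ?_ r o h
    intro br bo hx
    cases acc with
    | none =>
      simp only [pvStep] at hx
      injection hx with hx
      have : br = pvRank [] it.1 := by
        have := congrArg Prod.fst hx; simpa using this.symm
      simpa [pvRank] using this
    | some x =>
      obtain ⟨br0, bo0⟩ := x
      have hbr0 : br0 = 0 := hacc br0 bo0 rfl
      simp only [pvStep] at hx
      by_cases hlt : pvRank [] it.1 < br0
      · omega
      · rw [if_neg hlt] at hx
        injection hx with hx
        have : br = br0 := by
          have := congrArg Prod.fst hx; simpa using this.symm
        omega

-- pickAInner finds nothing iff no item contains p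
theorem pickAInner_none_iff (p : String) (items : List (String × String)) :
    pickAInner p items = none ↔ ∀ it ∈ items, PySem.Str.isIn p it.1 = false := by
  induction items with
  | nil => simp [pickAInner]
  | cons it rest ih =>
    obtain ⟨uf, orig⟩ := it
    by_cases hin : PySem.Str.isIn p uf
    · simp only [pickAInner, hin, if_true]
      constructor
      · intro h; cases h
      · intro h
        have := h (uf, orig) (by simp)
        simp only at this
        rw [hin] at this; cases this
    · have hin' : PySem.Str.isIn p uf = false := by simpa using hin
      simp only [pickAInner, hin', Bool.false_eq_true, if_false, ih]
      constructor
      · intro h it hmem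
        rcases List.mem_cons.mp hmem with h1 | h2
        · subst h1; exact hin'
        · exact h it h2
      · intro h it hmem
        exact h it (List.mem_cons_of_mem _ hmem)

-- rank never exceeds the priority-list length
theorem pvRank_le (ps : List String) (uf : String) : pvRank ps uf ≤ ps.length := by
  induction ps with
  | nil => simp [pvRank]
  | cons p ps' ih =>
    rw [pvRank_cons]
    by_cases hin : PySem.Str.isIn p uf
    · rw [if_pos hin]; simp
    · rw [if_neg hin]; simp; omega

-- main correspondence: A's nested scan equals B's argmin fold, for any priority list
theorem pickALoop_eq_fold (ps : List String) (items : List (String × String)) :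
    pickALoop ps items =
      match pvBestFold ps items none with
      | none => none
      | some (r, o) => if r < ps.length then some o else none := by
  induction ps with
  | nil =>
    cases hfold : pvBestFold [] items none with
    | none => simp [pickALoop]
    | some x =>
      obtain ⟨r, o⟩ := x
      have : r = 0 := pvBestFold_nil_rank items none (by intro _ _ h; cases h) r o hfold
      simp [pickALoop, this]
  | cons p rest ih =>
    cases hfind : pickAInner p items with
    | some o =>
      have hfold := pvBestFold_firstmatch p rest items o hfind none (by intro _ _ h; cases h)
      simp only [pickALoop, hfind, hfold]
      rw [if_pos (by simp)]
    | none =>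
      have hno : ∀ it ∈ items, PySem.Str.isIn p it.1 = false :=
        (pickAInner_none_iff p items).mp hfind
      have hshift := pvBestFold_shift p rest items hno none
      simp only [Option.map] at hshift
      simp only [pickALoop, hfind, ih, hshift]
      cases pvBestFold rest items none with
      | none => rfl
      | some x =>
        obtain ⟨r, o⟩ := x
        simp only [List.length]
        by_cases hlt : r < rest.length
        · have h2 : r + 1 < rest.length + 1 := by omega
          simp only [hlt, if_true, h2]
        · have h2 : ¬ r + 1 < rest.length + 1 := by omega
          simp only [hlt, if_false, h2]

-- every fold result rank is at most the priority-list length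
theorem pvBestFold_rank_le (ps : List String) (items : List (String × String))
    (acc : Option (Nat × String)) (hacc : ∀ br bo, acc = some (br, bo) → br ≤ ps.length) :
    ∀ r o, pvBestFold ps items acc = some (r, o) → r ≤ ps.length := by
  induction items generalizing acc with
  | nil => intro r o h; exact hacc r o h
  | cons it rest ih =>
    intro r o h
    rw [pvBestFold_eq_foldl, List.foldl_cons, ← pvBestFold_eq_foldl] at h
    refine ih _ ?_ r o h
    intro br bo hx
    have hrk := pvRank_le ps it.1
    cases acc with
    | none =>
      simp only [pvStep] at hx
      injection hx with hx
      have : br = pvRank ps it.1 := by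
        have := congrArg Prod.fst hx; simpa using this.symm
      omega
    | some x =>
      obtain ⟨br0, bo0⟩ := x
      have hbr0 := hacc br0 bo0 rfl
      simp only [pvStep] at hx
      by_cases hlt : pvRank ps it.1 < br0
      · rw [if_pos hlt] at hx
        injection hx with hx
        have : br = pvRank ps it.1 := by
          have := congrArg Prod.fst hx; simpa using this.symm
        omega
      · rw [if_neg hlt] at hx
        injection hx with hx
        have : br = br0 := by
          have := congrArg Prod.fst hx; simpa using this.symm
        omega

-- ===== VERDICT (by name: the statement is the Claim_ definition above) =====
theorem pick_default_moment_py_spec : Claim_equal_pick_default_moment_py := by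
  intro fields _ _
  unfold Spec_pick_default_moment_py pick_default_moment_py pick_default_moment_py_alt
  rw [pickALoop_eq_fold]
  cases hfold : pvBestFold pvPrio (pvUpper fields).items none with
  | none => rfl
  | some x =>
    obtain ⟨r, o⟩ := x
    have hle : r ≤ pvPrio.length :=
      pvBestFold_rank_le pvPrio (pvUpper fields).items none (by intro _ _ h; cases h) r o hfold
    by_cases hlt : r < pvPrio.length
    · have hne : (r == pvPrio.length) = false := by simp; omega
      simp only [hlt, if_true, hne, Bool.false_eq_true, if_false]
    · have heq : (r == pvPrio.length) = true := by simp; omega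
      simp only [hlt, if_false, heq, if_true]
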